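-- pv_equiv track=rewrite | github.com/OSU-NLP-Group/GroundCocoa | utils/scraping_utils.py | partition_info
-- ===== SOURCE A (Python) =====
-- def partition_info(info):
--     i = 0
--     grouped = []
--     while i < len(info) - 1:
--         j = i + 2
--         end = -1
--         while j < len(info):
--             if end_condition(info[j]):
--                 end = j
--                 break
--             j += 1
--         if end == -1:
--             break
--         grouped += [info[i:end]]
--         i = end
--     return grouped
--
-- def end_condition(x):
--     if len(x) < 2:
--         return False
--     if x[-2] == '+':
--         x = x[:-2]
--     if x[-2:] == 'AM' or x[-2:] == 'PM':
--         return True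
--     return False
-- ===== SOURCE B (Python) =====
-- def partition_info(info):
--     # Precompute the index table of time-like delimiters, then jump along it:
--     # each step binary-searches the table for the first delimiter >= i + 2.
--     cuts = [k for k, x in enumerate(info) if end_condition(x)]
--     grouped = []
--     i = 0
--     while True:
--         # bisect_left(cuts, i + 2) by hand (A imports nothing, so we may not either)
--         lo, hi = 0, len(cuts)
--         while lo < hi:
--             mid = (lo + hi) // 2
--             if cuts[mid] < i + 2:
--                 lo = mid + 1
--             else:
--                 hi = mid
--         if lo == len(cuts):
--             break
--         end = cuts[lo]
--         grouped.append(info[i:end])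
--         i = end
--     return grouped
--
-- def end_condition(x):
--     if len(x) < 2:
--         return False
--     if x[-2] == '+':
--         x = x[:-2]
--     if x[-2:] == 'AM' or x[-2:] == 'PM':
--         return True
--     return False
-- ===== Notes on version B (the rewrite author's own statement) =====
-- stated objective: alternative
-- what changed: Replaces A's nested rescanning while-loops by a precomputed index table of delimiter positions plus a jumping pass that binary-searches (hand-written bisect_left) the table for the first delimiter >= i+2 at each step.
import Mathlib
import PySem

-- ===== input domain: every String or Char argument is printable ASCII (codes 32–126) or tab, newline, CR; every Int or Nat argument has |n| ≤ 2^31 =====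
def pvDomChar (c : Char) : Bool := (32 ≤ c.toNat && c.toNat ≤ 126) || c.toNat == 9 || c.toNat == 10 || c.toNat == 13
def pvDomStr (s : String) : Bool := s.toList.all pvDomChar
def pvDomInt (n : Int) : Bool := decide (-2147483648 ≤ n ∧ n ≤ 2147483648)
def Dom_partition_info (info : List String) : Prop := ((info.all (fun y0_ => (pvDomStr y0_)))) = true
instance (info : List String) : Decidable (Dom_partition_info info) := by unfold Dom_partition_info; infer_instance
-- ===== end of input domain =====

-- B replaces A's nested rescanning while-loops by a precomputed table of
-- delimiter positions walked with a hand-written binary search (bisect_left)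
-- for the first delimiter >= i+2 (objective: alternative).

-- ===== PORT A =====
-- end_condition(x), shared helper of both Pythons
def endCond (x : String) : Bool :=
  let cs := x.toList
  if cs.length < 2 then false
  else
    let cs := if PySem.List.pyGet? cs (-2) == some '+' then PySem.List.slice cs none (some (-2)) else cs
    (PySem.List.slice cs (some (-2)) none == ['A', 'M']) ||
    (PySem.List.slice cs (some (-2)) none == ['P', 'M'])

-- inner while loop of A: first j ≥ start with end_condition(info[j]), else -1
def findEnd (info : List String) (j : Int) : Int :=
  if j < (info.length : Int) then
    if endCond (PySem.List.pyGetD info j "") then j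
    else findEnd info (j + 1)
  else -1
termination_by ((info.length : Int) - j).toNat
decreasing_by omega

-- outer while loop of A (fuel: i advances by at least 2 each iteration)
def loopA (info : List String) : Nat → Int → List (List String) → List (List String)
  | 0, _, acc => acc
  | fuel + 1, i, acc =>
    if i < (info.length : Int) - 1 then
      let e := findEnd info (i + 2)
      if e = -1 then acc
      else loopA info fuel e (acc ++ [PySem.List.slice info (some i) (some e)])
    else acc

def partition_info (info : List String) : List (List String) :=
  loopA info (info.length + 1) 0 []

-- ===== PORT B =====
-- hand-written bisect_left of Source B: inner while lo < hi loop
def bisectLeft (cuts : List Int) (t : Int) (lo hi : Nat) : Nat :=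
  if lo < hi then
    let mid := (lo + hi) / 2
    if cuts.getD mid 0 < t then bisectLeft cuts t (mid + 1) hi
    else bisectLeft cuts t lo mid
  else lo
termination_by hi - lo
decreasing_by all_goals omega

-- outer 'while True' loop of Source B (fuel: each step jumps past at least one cut)
def loopB (info : List String) (cuts : List Int) : Nat → Int → List (List String) → List (List String)
  | 0, _, acc => acc
  | fuel + 1, i, acc =>
    let idx := bisectLeft cuts (i + 2) 0 cuts.length
    if idx = cuts.length then acc
    else loopB info cuts fuel (cuts.getD idx 0)
           (acc ++ [PySem.List.slice info (some i) (some (cuts.getD idx 0))])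

def partition_info_alt (info : List String) : List (List String) :=
  let cuts := ((PySem.List.enumerate info 0).filter (fun p => endCond p.2)).map (·.1)
  loopB info cuts (cuts.length + 1) 0 []

-- ===== PRECONDITION & SPEC =====
def Spec_partition_info (info : List String) (out : List (List String)) : Prop := out = partition_info_alt info
instance (info : List String) (out : List (List String)) : Decidable (Spec_partition_info info out) := by unfold Spec_partition_info; infer_instance

-- ===== CLAIM (what is proved, stated in full; the proofs are below) =====
def Claim_equal_partition_info : Prop := ∀ (info : List String), Dom_partition_info info → Spec_partition_info info (partition_info info)

-- ===== LEMMAS AND PROOFS =====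

-- the delimiter positions of info (B's table, A's visiting order)
def cutsN (info : List String) : List Int :=
  ((PySem.List.enumerate info 0).filter (fun p => endCond p.2)).map (·.1)

theorem mem_cutsN {info : List String} {k : Int} :
    k ∈ cutsN info ↔ ∃ (m : Nat) (h : m < info.length), k = (m : Int) ∧ endCond info[m] = true := by
  simp only [cutsN, List.mem_map, List.mem_filter]
  constructor
  · rintro ⟨p, ⟨hp, hc⟩, rfl⟩
    rcases (PySem.List.mem_enumerate_iff info 0 p).mp hp with ⟨m, hm, rfl⟩
    exact ⟨m, hm, by simp, by simpa using hc⟩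
  · rintro ⟨m, hm, rfl, hc⟩
    exact ⟨((m : Int), info[m]), ⟨(PySem.List.mem_enumerate_iff info 0 _).mpr ⟨m, hm, by simp⟩, hc⟩, by simp⟩

theorem cutsN_sorted (info : List String) : (cutsN info).Pairwise (· < ·) :=
  List.Pairwise.map _ (fun _ _ h => h)
    ((PySem.List.pairwise_lt_enumerate info 0).filter _)

theorem cutsN_lt_len {info : List String} {k : Int} (hk : k ∈ cutsN info) :
    k < (info.length : Int) := by
  rcases mem_cutsN.mp hk with ⟨m, hm, rfl, -⟩; exact_mod_cast hm

theorem cutsN_nonneg {info : List String} {k : Int} (hk : k ∈ cutsN info) :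
    (0 : Int) ≤ k := by
  rcases mem_cutsN.mp hk with ⟨m, hm, rfl, -⟩; positivity

-- first element ≥ j of a strictly increasing list that contains j is j itself
theorem find_first_self {l : List Int} (hs : l.Pairwise (· < ·)) {j : Int} (hj : j ∈ l) :
    l.find? (fun k => decide (j ≤ k)) = some j := by
  induction l with
  | nil => cases hj
  | cons a t ih =>
    rcases List.mem_cons.mp hj with rfl | hj'
    · rw [List.find?_cons_of_pos (by simp)]
    · have ha : a < j := (List.pairwise_cons.mp hs).1 j hj'
      rw [List.find?_cons_of_neg (by simp; omega)]
      exact ih (List.pairwise_cons.mp hs).2 hj'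

-- if j itself is absent, searching for ≥ j is searching for ≥ j + 1
theorem find_ge_succ {l : List Int} {j : Int} (hj : j ∉ l) :
    l.find? (fun k => decide (j ≤ k)) = l.find? (fun k => decide (j + 1 ≤ k)) := by
  induction l with
  | nil => rfl
  | cons a t ih =>
    have hne : a ≠ j := fun h => hj (h ▸ List.mem_cons_self)
    by_cases h : j + 1 ≤ a
    · rw [List.find?_cons_of_pos (by simp; omega), List.find?_cons_of_pos (by simpa using h)]
    · rw [List.find?_cons_of_neg (by simp; omega), List.find?_cons_of_neg (by simpa using h)]
      exact ih (fun hm => hj (List.mem_cons_of_mem a hm))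

-- A's inner scan is find? over the delimiter table
theorem findEnd_eq_find (info : List String) (j : Int) (hj : 0 ≤ j) :
    findEnd info j =
      match (cutsN info).find? (fun k => decide (j ≤ k)) with
      | some k => k
      | none => -1 := by
  rw [findEnd]
  split
  case isTrue h =>
    rw [PySem.List.pyGetD_eq_getElem info "" hj h]
    by_cases hc : endCond (info[j.toNat]'(by omega)) = true
    · have hjmem : j ∈ cutsN info :=
        mem_cutsN.mpr ⟨j.toNat, by omega, by omega, hc⟩
      rw [if_pos hc, find_first_self (cutsN_sorted info) hjmem]
    · have hnot : j ∉ cutsN info := by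
        intro hm
        rcases mem_cutsN.mp hm with ⟨m, hl, he, hcm⟩
        have : m = j.toNat := by omega
        exact hc (this ▸ hcm)
      rw [if_neg hc, find_ge_succ hnot]
      exact findEnd_eq_find info (j + 1) (by omega)
  case isFalse h =>
    have hn : (cutsN info).find? (fun k => decide (j ≤ k)) = none := by
      apply List.find?_eq_none.mpr
      intro k hk
      have := cutsN_lt_len hk
      simpa using by omega
    rw [hn]
termination_by ((info.length : Int) - j).toNat
decreasing_by omega

-- binary-search invariant: bisectLeft on a sorted table separates <t from ≥t
theorem bisectLeft_spec (cuts : List Int) (t : Int)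
    (hs : List.Pairwise (· < ·) cuts) (lo hi : Nat) (hle : lo ≤ hi) (hhi : hi ≤ cuts.length)
    (hlow : ∀ k (h : k < cuts.length), k < lo → cuts[k] < t)
    (hhigh : ∀ k (h : k < cuts.length), hi ≤ k → t ≤ cuts[k]) :
    (∀ k (h : k < cuts.length), k < bisectLeft cuts t lo hi → cuts[k] < t) ∧
    (∀ k (h : k < cuts.length), bisectLeft cuts t lo hi ≤ k → t ≤ cuts[k]) ∧
    bisectLeft cuts t lo hi ≤ hi := by
  have hmono : ∀ i j (hi' : i < cuts.length) (hj : j < cuts.length), i ≤ j → cuts[i] ≤ cuts[j] := by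
    intro i j hi' hj hij
    rcases Nat.lt_or_eq_of_le hij with h | h
    · exact le_of_lt (List.pairwise_iff_getElem.mp hs i j hi' hj h)
    · subst h; exact le_rfl
  rw [bisectLeft]
  split
  case isTrue h =>
    have hmlt : (lo + hi) / 2 < cuts.length := by omega
    have hgd : cuts.getD ((lo + hi) / 2) 0 = cuts[(lo + hi) / 2] := List.getD_eq_getElem _ _ hmlt
    by_cases hc : cuts.getD ((lo + hi) / 2) 0 < t
    · rw [if_pos hc]
      have hr := bisectLeft_spec cuts t hs ((lo + hi) / 2 + 1) hi (by omega) hhi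
        (by intro k hk hklt
            calc cuts[k] ≤ cuts[(lo + hi) / 2] := hmono k _ hk hmlt (by omega)
              _ < t := by rw [← hgd]; exact hc)
        hhigh
      exact ⟨hr.1, hr.2.1, hr.2.2⟩
    · rw [if_neg hc]
      have hr := bisectLeft_spec cuts t hs lo ((lo + hi) / 2) (by omega) (by omega) hlow
        (by intro k hk hmk
            calc t ≤ cuts[(lo + hi) / 2] := by rw [← hgd]; omega
              _ ≤ cuts[k] := hmono _ k hmlt hk hmk)
      exact ⟨hr.1, hr.2.1, by omega⟩
  case isFalse h =>
    refine ⟨fun k hk hklo => hlow k hk (by omega),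
            fun k hk hlok => hhigh k hk (by omega), hle⟩
termination_by hi - lo
decreasing_by all_goals omega

-- main invariant for B: walking the remaining delimiter suffix equals B's loop,
-- provided every already-passed delimiter is below i + 2
theorem cuts_fold_eq_loopB (info : List String) :
    ∀ (cs pre : List Int) (fuel : Nat) (i : Int) (acc : List (List String)),
      cutsN info = pre ++ cs →
      (∀ k ∈ pre, k < i + 2) →
      cs.length ≤ fuel →
      (cs.foldl
        (fun st c =>
          if st.1 + 2 ≤ c then (c, st.2 ++ [PySem.List.slice info (some st.1) (some c)])
          else st) (i, acc)).2 = loopB info (cutsN info) fuel i acc := by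
  intro cs
  induction cs with
  | nil =>
    intro pre fuel i acc hsplit hpre hfuel
    have hall : ∀ k (h : k < (cutsN info).length), (cutsN info)[k] < i + 2 := by
      intro k hk
      have hpe : cutsN info = pre := by simpa using hsplit
      rw [List.getElem_of_eq hpe hk]
      exact hpre _ (List.getElem_mem _)
    cases fuel with
    | zero => rfl
    | succ fuel =>
      have hb := bisectLeft_spec (cutsN info) (i + 2) (cutsN_sorted info) 0
        (cutsN info).length (Nat.zero_le _) le_rfl
        (by intro k hk h0; omega) (by intro k hk hlk; omega)
      have hidx : bisectLeft (cutsN info) (i + 2) 0 (cutsN info).length = (cutsN info).length := by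
        rcases Nat.lt_or_eq_of_le hb.2.2 with hlt | heq
        · exact absurd (hb.2.1 _ hlt le_rfl) (by have := hall _ hlt; omega)
        · exact heq
      simp [loopB, hidx]
  | cons c cs ih =>
    intro pre fuel i acc hsplit hpre hfuel
    have hprelen : pre.length < (cutsN info).length := by rw [hsplit]; simp
    have hgetc : (cutsN info)[pre.length]'hprelen = c := by
      rw [List.getElem_of_eq hsplit hprelen, List.getElem_append_right le_rfl]
      simp
    by_cases hle : i + 2 ≤ c
    · -- c closes the current group: bisect finds index pre.length
      obtain ⟨fuel', rfl⟩ : ∃ f, fuel = f + 1 := by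
        cases fuel with
        | zero => simp at hfuel
        | succ f => exact ⟨f, rfl⟩
      have hb := bisectLeft_spec (cutsN info) (i + 2) (cutsN_sorted info) 0
        (cutsN info).length (Nat.zero_le _) le_rfl
        (by intro k hk h0; omega) (by intro k hk hlk; omega)
      have hpreval : ∀ k (h : k < (cutsN info).length), k < pre.length → (cutsN info)[k] < i + 2 := by
        intro k hk hkp
        have : (cutsN info)[k] ∈ pre := by
          rw [List.getElem_of_eq hsplit hk, List.getElem_append_left hkp]
          exact List.getElem_mem hkp
        exact hpre _ this
      have hmono := List.pairwise_iff_getElem.mp (cutsN_sorted info)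
      have hidx : bisectLeft (cutsN info) (i + 2) 0 (cutsN info).length = pre.length := by
        set r := bisectLeft (cutsN info) (i + 2) 0 (cutsN info).length with hr
        rcases Nat.lt_trichotomy r pre.length with h | h | h
        · have h1 := hb.2.1 r (by omega) le_rfl
          have h2 := hpreval r (by omega) h
          omega
        · exact h
        · have h1 := hb.1 pre.length hprelen h
          rw [hgetc] at h1; omega
      have hgd : (cutsN info).getD pre.length 0 = c := by
        rw [List.getD_eq_getElem _ _ hprelen, hgetc]
      simp only [loopB, hidx, hgd]
      rw [if_neg (by omega)]
      rw [List.foldl_cons, if_pos hle]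
      exact ih (pre ++ [c]) fuel' c (acc ++ [PySem.List.slice info (some i) (some c)])
        (by simpa using hsplit)
        (by intro k hk; rcases List.mem_append.mp hk with h | h
            · have := hpre k h; omega
            · simp at h; omega)
        (by simpa using Nat.le_of_succ_le_succ hfuel)
    · -- c is too close: the fold skips it and it is behind every later search
      rw [List.foldl_cons, if_neg hle]
      exact ih (pre ++ [c]) fuel i acc (by simpa using hsplit)
        (by intro k hk; rcases List.mem_append.mp hk with h | h
            · exact hpre k h
            · simp at h; omega)
        (le_trans (Nat.le_succ _) hfuel)

-- main invariant for A: walking the remaining delimiter suffix equals A's loop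
theorem cuts_fold_eq_loopA (info : List String) :
    ∀ (cs pre : List Int) (fuel : Nat) (i : Int) (acc : List (List String)),
      cutsN info = pre ++ cs →
      (∀ k ∈ pre, k < i + 2) →
      cs.length ≤ fuel →
      0 ≤ i →
      (cs.foldl
        (fun st c =>
          if st.1 + 2 ≤ c then (c, st.2 ++ [PySem.List.slice info (some st.1) (some c)])
          else st) (i, acc)).2 = loopA info fuel i acc := by
  intro cs
  induction cs with
  | nil =>
    intro pre fuel i acc hsplit hpre hfuel hi
    have hfe : findEnd info (i + 2) = -1 := by
      rw [findEnd_eq_find info (i + 2) (by omega)]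
      have hn : (cutsN info).find? (fun k => decide (i + 2 ≤ k)) = none := by
        apply List.find?_eq_none.mpr
        intro k hk
        have : k < i + 2 := hpre k (by simpa [hsplit] using hk)
        simpa using by omega
      rw [hn]
    cases fuel with
    | zero => rfl
    | succ fuel =>
      simp [loopA, hfe]
  | cons c cs ih =>
    intro pre fuel i acc hsplit hpre hfuel hi
    have hcmem : c ∈ cutsN info := by rw [hsplit]; simp
    have hclen : c < (info.length : Int) := cutsN_lt_len hcmem
    have hc0 : (0 : Int) ≤ c := cutsN_nonneg hcmem
    by_cases hle : i + 2 ≤ c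
    · -- c closes the current group
      have hfe : findEnd info (i + 2) = c := by
        rw [findEnd_eq_find info (i + 2) (by omega)]
        have hs : (cutsN info).find? (fun k => decide (i + 2 ≤ k)) = some c := by
          rw [hsplit, List.find?_append]
          have hp : pre.find? (fun k => decide (i + 2 ≤ k)) = none := by
            apply List.find?_eq_none.mpr
            intro k hk
            have := hpre k hk
            simpa using by omega
          rw [hp]
          rw [List.find?_cons_of_pos (by simpa using hle)]
          rfl
        rw [hs]
      obtain ⟨fuel', rfl⟩ : ∃ f, fuel = f + 1 := by
        cases fuel with
        | zero => simp at hfuel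
        | succ f => exact ⟨f, rfl⟩
      simp only [loopA]
      rw [if_pos (by omega), hfe, if_neg (by omega)]
      rw [List.foldl_cons, if_pos hle]
      exact ih (pre ++ [c]) fuel' c (acc ++ [PySem.List.slice info (some i) (some c)])
        (by simpa using hsplit)
        (by intro k hk; rcases List.mem_append.mp hk with h | h
            · have := hpre k h; omega
            · simp at h; omega)
        (by simpa using Nat.le_of_succ_le_succ hfuel) hc0
    · -- c is too close: A never sees it again either
      rw [List.foldl_cons, if_neg hle]
      exact ih (pre ++ [c]) fuel i acc (by simpa using hsplit)
        (by intro k hk; rcases List.mem_append.mp hk with h | h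
            · exact hpre k h
            · simp at h; omega)
        (le_trans (Nat.le_succ _) hfuel) hi

-- ===== VERDICT (by name: the statement is the Claim_ definition above) =====
theorem partition_info_spec : Claim_equal_partition_info := by
  intro info _
  unfold Spec_partition_info partition_info partition_info_alt
  have hcl : (cutsN info).length ≤ info.length := by
    unfold cutsN
    rw [List.length_map]
    exact le_trans (List.length_filter_le _ _) (le_of_eq (PySem.List.length_enumerate _ _))
  have hA := cuts_fold_eq_loopA info (cutsN info) [] (info.length + 1) 0 []
    rfl (by simp) (le_trans hcl (Nat.le_succ _)) le_rfl
  have hB := cuts_fold_eq_loopB info (cutsN info) [] ((cutsN info).length + 1) 0 []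
    rfl (by simp) (Nat.le_succ _)
  show loopA info (info.length + 1) 0 [] = loopB info (cutsN info) ((cutsN info).length + 1) 0 []
  rw [← hA, ← hB]
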